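-- pv_equiv track=rewrite | github.com/BalaShankar9/SecProbe | secprobe/core/payload_mutator.py | hex_escape
-- ===== SOURCE A (Python) =====
-- def hex_escape(payload: str) -> str:
--     """Hex escape for SQL/CMDi contexts (0xHH)."""
--     result = []
--     for ch in payload:
--         if ch in "'\"\\;-/":
--             result.append(f"\\x{ord(ch):02x}")
--         else:
--             result.append(ch)
--     return "".join(result)
-- ===== SOURCE B (Python) =====
-- def hex_escape(payload: str) -> str:
--     """Hex escape for SQL/CMDi contexts (0xHH)."""
--     # Staged whole-string passes: escape backslash first so the backslashes
--     # introduced by later escapes are never re-escaped.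
--     out = payload.replace("\\", "\\x5c")
--     for c in "'\";-/":
--         out = out.replace(c, f"\\x{ord(c):02x}")
--     return out
-- ===== Notes on version B (the rewrite author's own statement) =====
-- stated objective: alternative
-- what changed: Replaces the single per-character loop with if/else dispatch by six staged whole-string str.replace passes, escaping backslash first so escapes introduced by later passes are never re-escaped.
import Mathlib
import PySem

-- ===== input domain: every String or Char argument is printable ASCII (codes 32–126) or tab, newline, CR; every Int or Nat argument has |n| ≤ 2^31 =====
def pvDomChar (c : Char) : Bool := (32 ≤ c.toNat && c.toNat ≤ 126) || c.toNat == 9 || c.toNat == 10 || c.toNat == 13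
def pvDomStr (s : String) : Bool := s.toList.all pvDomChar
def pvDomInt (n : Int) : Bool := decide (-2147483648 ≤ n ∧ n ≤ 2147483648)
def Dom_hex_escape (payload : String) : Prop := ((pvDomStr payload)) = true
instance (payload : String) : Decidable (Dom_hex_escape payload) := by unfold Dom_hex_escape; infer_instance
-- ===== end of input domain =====

-- B replaces A's single per-character loop with if/else by six staged whole-string
-- str.replace passes (backslash escaped first so escapes introduced later are never
-- re-escaped) — an alternative decomposition, same asymptotic cost.

-- shared formatting helper: f"\x{n:02x}" for n < 256 (exact on Dom, whose chars are < 128)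
def pvHexDigit (n : Nat) : Char :=
  if n < 10 then Char.ofNat (48 + n) else Char.ofNat (87 + n)

def pvHex2 (n : Nat) : List Char :=
  ['\\', 'x', pvHexDigit (n / 16), pvHexDigit (n % 16)]

-- ===== PORT A =====
def hex_escape (payload : String) : String :=
  String.ofList
    (payload.toList.foldl
      (fun acc ch =>
        acc ++ (if "'\"\\;-/".toList.contains ch then pvHex2 ch.toNat else [ch]))
      [])

-- ===== PORT B =====
-- out = payload.replace("\\", "\\x5c"); for c in "'\";-/": out = out.replace(c, f"\\x{ord(c):02x}")
def hex_escape_alt (payload : String) : String :=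
  "'\";-/".toList.foldl
    (fun out c =>
      PySem.Str.replace out (String.ofList [c]) (String.ofList (pvHex2 c.toNat)))
    (PySem.Str.replace payload "\\" "\\x5c")

-- ===== PRECONDITION & SPEC =====
def Spec_hex_escape (payload : String) (out : String) : Prop := out = hex_escape_alt payload
instance (payload : String) (out : String) : Decidable (Spec_hex_escape payload out) := by unfold Spec_hex_escape; infer_instance

-- ===== CLAIM (what is proved, stated in full; the proofs are below) =====
def Claim_equal_hex_escape : Prop := ∀ (payload : String), Dom_hex_escape payload → Spec_hex_escape payload (hex_escape payload)

-- ===== LEMMAS AND PROOFS =====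

-- replace with a single-character pattern is a flatMap
lemma pv_go_single (o : Char) (new : List Char) :
    ∀ (fuel : Nat) (l acc : List Char), l.length ≤ fuel →
    PySem.Chars.replace.go [o] new fuel l acc
      = acc.reverse ++ l.flatMap (fun c => if c == o then new else [c]) := by
  intro fuel
  induction fuel with
  | zero =>
    intro l acc h
    cases l with
    | nil => simp [PySem.Chars.replace.go]
    | cons c t => simp at h
  | succ n ih =>
    intro l acc h
    cases l with
    | nil => simp [PySem.Chars.replace.go]
    | cons c t =>
      rw [PySem.Chars.replace.go]
      by_cases hc : c = o
      · subst hc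
        simp only [List.isPrefixOf, BEq.rfl, Bool.true_and, if_true]
        rw [ih _ _ (by simpa using h)]
        simp
      · have hp : ([o].isPrefixOf (c :: t)) = false := by
          simp [List.isPrefixOf, Ne.symm hc]
        simp only [hp, Bool.false_eq_true, if_false]
        rw [ih _ _ (by simpa using Nat.le_of_succ_le_succ h)]
        simp [hc]

lemma pv_replace_single (s : List Char) (o : Char) (new : List Char) :
    PySem.Chars.replace s [o] new = s.flatMap (fun c => if c == o then new else [c]) := by
  rw [PySem.Chars.replace]
  simp [pv_go_single o new s.length s [] le_rfl]

-- the per-character effect of the six staged passes equals A's single dispatch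
lemma pv_pointwise (ch : Char) :
    ((if ch == '\\' then pvHex2 92 else [ch]).flatMap
      (fun x => (if x == '\'' then pvHex2 '\''.toNat else [x]).flatMap
        (fun x => (if x == '"' then pvHex2 '"'.toNat else [x]).flatMap
          (fun x => (if x == ';' then pvHex2 ';'.toNat else [x]).flatMap
            (fun x => (if x == '-' then pvHex2 '-'.toNat else [x]).flatMap
              (fun c => if c == '/' then pvHex2 '/'.toNat else [c]))))))
      = (if "'\"\\;-/".toList.contains ch then pvHex2 ch.toNat else [ch]) := by
  by_cases h : "'\"\\;-/".toList.contains ch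
  · have hm : ch = '\'' ∨ ch = '"' ∨ ch = '\\' ∨ ch = ';' ∨ ch = '-' ∨ ch = '/' := by
      have hmem := List.mem_of_elem_eq_true h
      simp only [show "'\"\\;-/".toList = ['\'', '"', '\\', ';', '-', '/'] from rfl,
        List.mem_cons, List.not_mem_nil, or_false] at hmem
      exact hmem
    rcases hm with rfl | rfl | rfl | rfl | rfl | rfl <;> decide
  · have h39 : (ch == '\'') = false := by
      simp only [beq_eq_false_iff_ne]; intro e; exact h (by subst e; decide)
    have h34 : (ch == '"') = false := by
      simp only [beq_eq_false_iff_ne]; intro e; exact h (by subst e; decide)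
    have h92 : (ch == '\\') = false := by
      simp only [beq_eq_false_iff_ne]; intro e; exact h (by subst e; decide)
    have h59 : (ch == ';') = false := by
      simp only [beq_eq_false_iff_ne]; intro e; exact h (by subst e; decide)
    have h45 : (ch == '-') = false := by
      simp only [beq_eq_false_iff_ne]; intro e; exact h (by subst e; decide)
    have h47 : (ch == '/') = false := by
      simp only [beq_eq_false_iff_ne]; intro e; exact h (by subst e; decide)
    have n39 : ch ≠ '\'' := by simpa using h39
    have n34 : ch ≠ '"' := by simpa using h34
    have n92 : ch ≠ '\\' := by simpa using h92
    have n59 : ch ≠ ';' := by simpa using h59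
    have n45 : ch ≠ '-' := by simpa using h45
    have n47 : ch ≠ '/' := by simpa using h47
    simp [n39, n34, n92, n59, n45, n47]

-- ===== VERDICT (by name: the statement is the Claim_ definition above) =====
theorem hex_escape_spec : Claim_equal_hex_escape := by
  intro payload _
  unfold Spec_hex_escape hex_escape hex_escape_alt
  have hlist :
      (hex_escape_alt payload).toList
        = payload.toList.flatMap
            (fun ch => if "'\"\\;-/".toList.contains ch then pvHex2 ch.toNat else [ch]) := by
    unfold hex_escape_alt
    simp only [show "'\";-/".toList = ['\'', '"', ';', '-', '/'] from rfl, List.foldl]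
    simp only [PySem.Str.toList_replace, String.toList_ofList]
    rw [show ("\\" : String).toList = ['\\'] from rfl,
        show ("\\x5c" : String).toList = pvHex2 92 from rfl]
    rw [pv_replace_single, pv_replace_single, pv_replace_single, pv_replace_single,
        pv_replace_single, pv_replace_single]
    rw [List.flatMap_assoc, List.flatMap_assoc, List.flatMap_assoc, List.flatMap_assoc,
        List.flatMap_assoc]
    exact List.flatMap_congr (fun ch _ => pv_pointwise ch)
  have : (hex_escape payload).toList = (hex_escape_alt payload).toList := by
    unfold hex_escape
    rw [String.toList_ofList, PySem.List.foldl_append_eq_flatMap, List.nil_append, hlist]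
  calc hex_escape payload = String.ofList (hex_escape payload).toList := by
        rw [String.ofList_toList]
    _ = String.ofList (hex_escape_alt payload).toList := by rw [this]
    _ = hex_escape_alt payload := String.ofList_toList
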